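-- pv_equiv track=rewrite | github.com/ax128/logdog | logwatch/notify/telegram.py | telegram_markdown_unsafe
-- ===== SOURCE A (Python) =====
-- def telegram_markdown_unsafe(text: str) -> bool:
--     """Detect text that will likely fail Telegram legacy Markdown parsing.
--     Rule: outside code spans, an unescaped '_' with alphanumeric neighbors on both sides is unsafe.
--     """
--     value = str(text or "")
--     if "_" not in value:
--         return False
--     in_code = False
--     for idx, ch in enumerate(value):
--         prev = value[idx - 1] if idx > 0 else ""
--         escaped = prev == "\\"
--         if ch == "`" and not escaped:
--             in_code = not in_code
--             continue
--         if in_code: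
--             continue
--         if ch != "_" or escaped:
--             continue
--         left = value[idx - 1] if idx > 0 else ""
--         right = value[idx + 1] if idx + 1 < len(value) else ""
--         if left.isalnum() and right.isalnum():
--             return True
--     return False
-- ===== SOURCE B (Python) =====
-- def _has_triple(seg):
--     for a, b, c in zip(seg, seg[1:], seg[2:]):
--         if b == "_" and a.isalnum() and c.isalnum():
--             return True
--     return False
--
--
-- def telegram_markdown_unsafe(text: str) -> bool:
--     """Two-phase check: first split the text into regions at each unescaped
--     backtick (regions alternate out-of-code / in-code, starting out-of-code),
--     then search each out-of-code region for an underscore with alphanumeric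
--     neighbors on both sides."""
--     value = str(text or "")
--     regions = []
--     cur = []
--     prev = ""
--     for ch in value:
--         if ch == "`" and prev != "\\":
--             regions.append(cur)
--             cur = []
--         else:
--             cur.append(ch)
--         prev = ch
--     regions.append(cur)
--     out_of_code = True
--     for seg in regions:
--         if out_of_code and _has_triple(seg):
--             return True
--         out_of_code = not out_of_code
--     return False
-- ===== Notes on version B (the rewrite author's own statement) =====
-- stated objective: alternative
-- what changed: A makes one stateful indexed pass toggling an in-code flag and checking neighbors via value[idx-1]/value[idx+1]; B first partitions the text into regions at unescaped backticks and then searches each out-of-code region for a consecutive alnum-underscore-alnum triple (A's escaped-underscore guard is dead since a backslash is never alphanumeric).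
import Mathlib
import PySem

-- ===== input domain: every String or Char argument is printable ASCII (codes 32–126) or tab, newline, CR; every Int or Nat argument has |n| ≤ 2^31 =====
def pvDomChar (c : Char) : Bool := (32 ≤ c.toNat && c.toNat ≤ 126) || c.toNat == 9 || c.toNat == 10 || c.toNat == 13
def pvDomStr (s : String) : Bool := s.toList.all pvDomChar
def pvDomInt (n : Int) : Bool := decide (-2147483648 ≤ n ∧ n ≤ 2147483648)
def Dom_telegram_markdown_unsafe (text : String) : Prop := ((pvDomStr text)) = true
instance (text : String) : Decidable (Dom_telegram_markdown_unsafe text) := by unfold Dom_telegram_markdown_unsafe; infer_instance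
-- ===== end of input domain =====

-- B replaces A's single stateful indexed pass by a split-into-regions-then-search-each-region decomposition (alternative decomposition, same cost).

-- ===== PORT A =====
-- "" as a neighbor/prev is modelled as none; str.isalnum() of "" is false
def pvAlnumO (o : Option Char) : Bool := o.elim false PySem.Chars.isalnum

-- the enumerate loop of A, with early return True encoded as returning true
def pvALoop (value : List Char) : List (Int × Char) → Bool → Bool
  | [], _ => false
  | (idx, ch) :: rest, inCode =>
    let prev : Option Char := if idx > 0 then PySem.List.pyGet? value (idx - 1) else none
    let escaped : Bool := prev = some '\\'
    if ch = '`' ∧ ¬(escaped = true) then pvALoop value rest (!inCode)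
    else if inCode then pvALoop value rest inCode
    else if ch ≠ '_' ∨ escaped = true then pvALoop value rest inCode
    else
      let left := prev
      let right : Option Char := if idx + 1 < (value.length : Int) then PySem.List.pyGet? value (idx + 1) else none
      if pvAlnumO left ∧ pvAlnumO right then true else pvALoop value rest inCode

def telegram_markdown_unsafe (text : String) : Bool :=
  -- str(text or "") is text itself (if text is "" the 'or' yields the same "")
  let value := text.toList
  if PySem.Chars.isIn ['_'] value = false then false
  else pvALoop value (PySem.List.enumerate value 0) false

-- ===== PORT B =====
def pvHasTriple : List Char → Bool
  | a :: b :: c :: rest => (b = '_' && PySem.Chars.isalnum a && PySem.Chars.isalnum c) || pvHasTriple (b :: c :: rest)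
  | _ => false

def pvBStep (st : List (List Char) × List Char × Option Char) (ch : Char) :
    List (List Char) × List Char × Option Char :=
  let (regs, cur, prev) := st
  if ch = '`' ∧ prev ≠ some '\\' then (regs ++ [cur], [], some ch)
  else (regs, cur ++ [ch], some ch)

def pvBRegions : List (List Char) → Bool → Bool
  | [], _ => false
  | s :: ss, outOfCode => (outOfCode && pvHasTriple s) || pvBRegions ss (!outOfCode)

def telegram_markdown_unsafe_alt (text : String) : Bool :=
  let value := text.toList
  let st := value.foldl pvBStep ([], [], none)
  pvBRegions (st.1 ++ [st.2.1]) true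

-- ===== PRECONDITION & SPEC =====
def Spec_telegram_markdown_unsafe (text : String) (out : Bool) : Prop := out = telegram_markdown_unsafe_alt text
instance (text : String) (out : Bool) : Decidable (Spec_telegram_markdown_unsafe text out) := by unfold Spec_telegram_markdown_unsafe; infer_instance

-- ===== CLAIM (what is proved, stated in full; the proofs are below) =====
def Claim_equal_telegram_markdown_unsafe : Prop := ∀ (text : String), Dom_telegram_markdown_unsafe text → Spec_telegram_markdown_unsafe text (telegram_markdown_unsafe text)

-- ===== LEMMAS AND PROOFS =====

-- structural (prev-carrying) version of A's loop, proof-only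
def pvLoop2 : Option Char → List Char → Bool → Bool
  | _, [], _ => false
  | p, c :: rest, inCode =>
    if c = '`' ∧ p ≠ some '\\' then pvLoop2 (some c) rest (!inCode)
    else if inCode then pvLoop2 (some c) rest inCode
    else if c ≠ '_' ∨ p = some '\\' then pvLoop2 (some c) rest inCode
    else if pvAlnumO p ∧ pvAlnumO rest.head? then true else pvLoop2 (some c) rest inCode

-- split into (first region, later regions), proof-only mirror of B's fold
def pvSplit : Option Char → List Char → List Char × List (List Char)
  | _, [] => ([], [])
  | p, c :: rest =>
    if c = '`' ∧ p ≠ some '\\' then ([], (pvSplit (some c) rest).1 :: (pvSplit (some c) rest).2)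
    else (c :: (pvSplit (some c) rest).1, (pvSplit (some c) rest).2)

-- pvHasTriple with an explicit left neighbor for the first char
def pvHasTripleW : Option Char → List Char → Bool
  | _, [] => false
  | p, b :: rest => (b = '_' && pvAlnumO p && pvAlnumO rest.head?) || pvHasTripleW (some b) rest

theorem pvALoop_bridge (l : List Char) : ∀ (pre : List Char) (b : Bool),
    pvALoop (pre ++ l) (PySem.List.enumerate l (pre.length : Int)) b = pvLoop2 pre.getLast? l b := by
  induction l with
  | nil => intro pre b; simp [PySem.List.enumerate_nil, pvALoop, pvLoop2]
  | cons c rest ih =>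
    intro pre b
    rw [PySem.List.enumerate_cons]
    have hprev : (if ((pre.length : Int) > 0) then PySem.List.pyGet? (pre ++ c :: rest) ((pre.length : Int) - 1) else none) = pre.getLast? := by
      cases pre with
      | nil => simp
      | cons x xs =>
        rw [if_pos (by simp)]
        have hcast : ((x :: xs).length : Int) - 1 = (((x :: xs).length - 1 : Nat) : Int) := by
          simp
        rw [hcast, PySem.List.pyGet?_natCast]
        rw [List.getElem?_append_left (by simp)]
        rw [List.getLast?_eq_getElem?]
    have hright : (if ((pre.length : Int) + 1 < ((pre ++ c :: rest).length : Int)) then PySem.List.pyGet? (pre ++ c :: rest) ((pre.length : Int) + 1) else none) = rest.head? := by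
      cases rest with
      | nil => rw [if_neg (by simp)]; rfl
      | cons d r =>
        rw [if_pos (by simp)]
        have hcast : ((pre.length : Int) + 1) = ((pre.length + 1 : Nat) : Int) := by push_cast; ring
        rw [hcast, PySem.List.pyGet?_natCast]
        rw [List.getElem?_append_right (by omega)]
        simp
    have hrec : ∀ b' : Bool, pvALoop (pre ++ c :: rest) (PySem.List.enumerate rest ((pre.length : Int) + 1)) b' = pvLoop2 (some c) rest b' := by
      intro b'
      have e1 : pre ++ c :: rest = (pre ++ [c]) ++ rest := by simp
      have e2 : ((pre.length : Int) + 1) = (((pre ++ [c]).length : Nat) : Int) := by simp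
      rw [e1, e2, ih (pre ++ [c]) b']
      simp
    simp only [pvALoop, pvLoop2, hprev, hright, decide_eq_true_eq]
    split_ifs <;> first | rfl | apply hrec

theorem pvLoop2_no_underscore (l : List Char) (p : Option Char) (b : Bool)
    (h : '_' ∉ l) : pvLoop2 p l b = false := by
  induction l generalizing p b with
  | nil => rfl
  | cons c rest ih =>
    have hc : c ≠ '_' := fun hc => h (hc ▸ List.mem_cons_self ..)
    have hr : '_' ∉ rest := fun hm => h (List.mem_cons_of_mem _ hm)
    unfold pvLoop2
    split_ifs with h1 h2 h3 <;> simp_all [ih _ _ hr]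


theorem pvHasTripleW_some (l : List Char) : ∀ (a : Char),
    pvHasTripleW (some a) l = pvHasTriple (a :: l) := by
  induction l with
  | nil => simp [pvHasTripleW, pvHasTriple]
  | cons b rest ih =>
    intro a
    cases rest with
    | nil => simp [pvHasTripleW, pvHasTriple, pvAlnumO]
    | cons c r =>
      rw [pvHasTripleW, ih b]
      simp [pvHasTriple, pvAlnumO, List.head?]


theorem pvHasTripleW_not_alnum (l : List Char) (p : Option Char) (h : pvAlnumO p = false) :
    pvHasTripleW p l = pvHasTriple l := by
  cases l with
  | nil => rfl
  | cons b rest =>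
    simp only [pvHasTripleW, h, pvHasTripleW_some rest b]
    cases rest with
    | nil => simp [pvHasTriple]
    | cons c r => simp [pvAlnumO, List.head?]


theorem pvSplit_head (q : Option Char) (rest : List Char) :
    pvAlnumO (pvSplit q rest).1.head? = pvAlnumO rest.head? := by
  cases rest with
  | nil => rfl
  | cons d r =>
    by_cases h : d = '`' ∧ q ≠ some '\\'
    · have hd : d = '`' := h.1
      subst hd
      simp [pvSplit, h, pvAlnumO, List.head?]
      all_goals decide
    · simp [pvSplit, h, List.head?]


theorem pvLoop2_split (l : List Char) : ∀ (p : Option Char),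
    (pvLoop2 p l false = (pvHasTripleW p (pvSplit p l).1 || pvBRegions (pvSplit p l).2 false)) ∧
    (pvLoop2 p l true = pvBRegions ((pvSplit p l).1 :: (pvSplit p l).2) false) := by
  induction l with
  | nil => intro p; constructor <;> simp [pvLoop2, pvSplit, pvHasTripleW, pvBRegions]
  | cons c rest ih =>
    intro p
    by_cases h : c = '`' ∧ p ≠ some '\\'
    · constructor
      · simp only [pvLoop2, pvSplit, if_pos h, Bool.not_false]
        rw [(ih (some c)).2]
        simp [pvHasTripleW]
      · simp only [pvLoop2, pvSplit, if_pos h, Bool.not_true]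
        rw [(ih (some c)).1]
        rw [pvHasTripleW_not_alnum _ _ (by rw [h.1]; decide)]
        simp [pvBRegions]
    · have h1a : pvLoop2 (some c) rest false =
          (pvHasTripleW (some c) (pvSplit (some c) rest).1 || pvBRegions (pvSplit (some c) rest).2 false) :=
        (ih (some c)).1
      constructor
      · simp only [pvLoop2, pvSplit, if_neg h]
        by_cases hc : c ≠ '_' ∨ p = some '\\'
        · rw [if_pos hc, h1a]
          simp only [pvHasTripleW, pvSplit_head]
          rcases hc with hc | hc
          · simp [hc]
          · have : pvAlnumO p = false := by rw [hc]; decide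
            simp [this]
        · rw [if_neg hc]
          rw [not_or] at hc
          obtain ⟨hc1, -⟩ := hc
          rw [not_not] at hc1
          subst hc1
          simp only [pvHasTripleW, pvSplit_head]
          by_cases ha : pvAlnumO p = true ∧ pvAlnumO rest.head? = true
          · simp [ha.1, ha.2]
          · rw [if_neg ha, h1a]
            have hX : (pvAlnumO p && pvAlnumO rest.head?) = false := by
              cases hp : pvAlnumO p with
              | false => simp
              | true =>
                cases hr : pvAlnumO rest.head? with
                | false => simp
                | true => exact absurd ⟨hp, hr⟩ ha
            simp [hX]
      · simp only [pvLoop2, pvSplit, if_neg h]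
        rw [(ih (some c)).2]
        simp [pvBRegions]


theorem pvFoldl_split (l : List Char) : ∀ (regs : List (List Char)) (cur : List Char) (p : Option Char),
    (l.foldl pvBStep (regs, cur, p)).1 ++ [(l.foldl pvBStep (regs, cur, p)).2.1] =
      regs ++ (cur ++ (pvSplit p l).1) :: (pvSplit p l).2 := by
  induction l with
  | nil => simp [pvSplit]
  | cons c rest ih =>
    intro regs cur p
    by_cases h : c = '`' ∧ p ≠ some '\\'
    · simp only [List.foldl_cons, pvBStep, if_pos h, ih, pvSplit]
      simp [h]
    · simp only [List.foldl_cons, pvBStep, if_neg h, ih, pvSplit]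
      simp


theorem pvMain (value : List Char) :
    pvLoop2 none value false = pvBRegions ((pvSplit none value).1 :: (pvSplit none value).2) true := by
  rw [(pvLoop2_split value none).1,
    pvHasTripleW_not_alnum _ _ (by decide)]
  simp [pvBRegions]


-- ===== VERDICT (by name: the statement is the Claim_ definition above) =====
theorem telegram_markdown_unsafe_spec : Claim_equal_telegram_markdown_unsafe := by
  intro text _
  unfold Spec_telegram_markdown_unsafe telegram_markdown_unsafe telegram_markdown_unsafe_alt
  dsimp only
  have hB : pvBRegions ((text.toList.foldl pvBStep ([], [], none)).1 ++
        [(text.toList.foldl pvBStep ([], [], none)).2.1]) true = pvLoop2 none text.toList false := by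
    rw [pvFoldl_split text.toList [] [] none, pvMain text.toList]
    simp
  by_cases hin : PySem.Chars.isIn ['_'] text.toList = false
  · rw [if_pos hin, hB]
    have hmem : '_' ∉ text.toList := by
      rw [PySem.Chars.isIn_eq_false_iff, List.singleton_infix_iff] at hin
      exact hin
    rw [pvLoop2_no_underscore _ _ _ hmem]
  · rw [if_neg hin]
    have h0 := pvALoop_bridge text.toList [] false
    simp only [List.nil_append, List.length_nil, Nat.cast_zero, List.getLast?_nil] at h0
    rw [h0, hB]
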